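-- pv_equiv track=rewrite | github.com/bryanmiller/GreedyMaxScheduler | odb_extractor_atoms.py | select_qastate
-- ===== SOURCE A (Python) =====
-- def select_qastate(states):
--     """Return the qastate based on precedence
--
--         states: list of observe states from the ODB extractor obsLog
--     """
--     qastate = ''
--
--     # Precedence order for observation classes.
--     qastate_order = ['NONE', 'UNDEFINED', 'FAIL', 'USABLE', 'PASS']
--
--     # Set the qastate for the entire observation based on precedence
--     for state in qastate_order:
--         if state in states:
--             qastate = state
--             break
--
--     return qastate
-- ===== SOURCE B (Python) =====
-- def select_qastate(states):
--     """Return the qastate based on precedence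
--
--         states: list of observe states from the ODB extractor obsLog
--     """
--     rank = {'NONE': 0, 'UNDEFINED': 1, 'FAIL': 2, 'USABLE': 3, 'PASS': 4}
--     best = None  # (rank, name) with the smallest rank seen so far
--     for s in states:
--         r = rank.get(s)
--         if r is not None and (best is None or r < best[0]):
--             best = (r, s)
--     return best[1] if best is not None else ''
-- ===== Notes on version B (the rewrite author's own statement) =====
-- stated objective: alternative
-- what changed: B makes a single pass over the input states keeping the minimum-rank state via a precedence dict, instead of A scanning the fixed precedence list with a membership test over the whole input for each entry.
import Mathlib
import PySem

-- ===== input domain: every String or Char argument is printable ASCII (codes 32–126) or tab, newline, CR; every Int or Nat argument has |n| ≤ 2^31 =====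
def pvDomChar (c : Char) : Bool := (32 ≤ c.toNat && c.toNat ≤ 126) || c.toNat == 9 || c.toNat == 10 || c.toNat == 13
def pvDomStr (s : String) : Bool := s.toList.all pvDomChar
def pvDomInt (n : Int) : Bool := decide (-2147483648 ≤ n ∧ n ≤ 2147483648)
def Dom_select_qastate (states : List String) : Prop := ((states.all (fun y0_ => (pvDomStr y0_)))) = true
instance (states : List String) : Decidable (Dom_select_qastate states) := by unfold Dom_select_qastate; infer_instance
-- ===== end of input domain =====

-- B makes a single pass over the input keeping the minimum-rank state (via a precedence dict),
-- instead of A scanning the fixed precedence list with a membership test per entry.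

-- ===== PORT A =====
def qastate_order : List String := ["NONE", "UNDEFINED", "FAIL", "USABLE", "PASS"]

-- the 'for state in qastate_order: if state in states: qastate = state; break' loop
def selLoopA (states : List String) : List String → String → String
  | [], q => q
  | s :: rest, q => if states.contains s then s else selLoopA states rest q

def select_qastate (states : List String) : String :=
  selLoopA states qastate_order ""

-- ===== PORT B =====
def qarank : PySem.Dict String Int :=
  PySem.Dict.mk [("NONE", 0), ("UNDEFINED", 1), ("FAIL", 2), ("USABLE", 3), ("PASS", 4)]

def select_qastate_alt (states : List String) : String :=
  let best := states.foldl
    (fun (b : Option (Int × String)) s =>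
      match PySem.Dict.get? qarank s with
      | none => b
      | some r =>
        match b with
        | none => some (r, s)
        | some p => if r < p.1 then some (r, s) else b)
    none
  match best with
  | none => ""
  | some p => p.2

-- ===== PRECONDITION & SPEC =====
def Spec_select_qastate (states : List String) (out : String) : Prop := out = select_qastate_alt states
instance (states : List String) (out : String) : Decidable (Spec_select_qastate states out) := by unfold Spec_select_qastate; infer_instance

-- ===== CLAIM (what is proved, stated in full; the proofs are below) =====
def Claim_equal_select_qastate : Prop := ∀ (states : List String), Dom_select_qastate states → Spec_select_qastate states (select_qastate states)

-- ===== LEMMAS AND PROOFS =====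

-- rank of a state, with 5 as 'not in the dict'
def rv (s : String) : Int := (PySem.Dict.get? qarank s).getD 5

-- minimum rank occurring in a list (5 if none)
def mr : List String → Int
  | [] => 5
  | s :: t => min (rv s) (mr t)

-- the name at each rank
def nm (i : Int) : String :=
  if i = 0 then "NONE" else if i = 1 then "UNDEFINED" else if i = 2 then "FAIL"
  else if i = 3 then "USABLE" else if i = 4 then "PASS" else ""

lemma rv_char (s : String) :
    rv s = (if "NONE" = s then 0 else if "UNDEFINED" = s then 1 else if "FAIL" = s then 2
            else if "USABLE" = s then 3 else if "PASS" = s then 4 else 5) := by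
  simp only [rv, qarank, PySem.Dict.get?_mk_cons, beq_iff_eq]
  split_ifs <;> simp [PySem.Dict.get?]

lemma rank_char {s : String} {r : Int} (h : PySem.Dict.get? qarank s = some r) :
    0 ≤ r ∧ r < 5 ∧ nm r = s ∧ rv s = r := by
  have hv : rv s = r := by simp [rv, h]
  have hc := rv_char s
  rw [hv] at hc
  split_ifs at hc with h1 h2 h3 h4 h5 <;> subst hc
  · exact ⟨by norm_num, by norm_num, by simpa [nm] using h1, hv⟩
  · exact ⟨by norm_num, by norm_num, by simpa [nm] using h2, hv⟩
  · exact ⟨by norm_num, by norm_num, by simpa [nm] using h3, hv⟩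
  · exact ⟨by norm_num, by norm_num, by simpa [nm] using h4, hv⟩
  · exact ⟨by norm_num, by norm_num, by simpa [nm] using h5, hv⟩
  · exfalso
    have hn : PySem.Dict.get? qarank s = none := by
      simp [qarank, beq_iff_eq, h1, h2, h3, h4, h5, PySem.Dict.get?]
    rw [h] at hn
    exact (by simp at hn : False)

lemma mr_bounds (l : List String) : 0 ≤ mr l ∧ mr l ≤ 5 := by
  induction l with
  | nil => simp [mr]
  | cons s t ih =>
    have h := rv_char s
    constructor
    · apply le_min
      · split_ifs at h <;> omega
      · exact ih.1
    · exact le_trans (min_le_right _ _) ih.2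

def stepB (b : Option (Int × String)) (s : String) : Option (Int × String) :=
  match PySem.Dict.get? qarank s with
  | none => b
  | some r =>
    match b with
    | none => some (r, s)
    | some p => if r < p.1 then some (r, s) else b

lemma foldl_some (t : List String) : ∀ i : Int, 0 ≤ i → i < 5 →
    t.foldl stepB (some (i, nm i)) = some (min i (mr t), nm (min i (mr t))) := by
  induction t with
  | nil =>
    intro i h0 h5
    have : min i (mr []) = i := by simp [mr]; omega
    simp [this]
  | cons s t ih =>
    intro i h0 h5
    simp only [List.foldl_cons]
    rcases hg : PySem.Dict.get? qarank s with _ | r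
    · have hrv : rv s = 5 := by simp [rv, hg]
      have hb := mr_bounds t
      have hm : min i (mr (s :: t)) = min i (mr t) := by
        simp only [mr, hrv]; omega
      rw [hm]
      simpa [stepB, hg] using ih i h0 h5
    · obtain ⟨hr0, hr5, hnm, hrv⟩ := rank_char hg
      by_cases hlt : r < i
      · have hstep : stepB (some (i, nm i)) s = some (r, nm r) := by
          simp [stepB, hg, hlt, hnm]
        rw [hstep, ih r hr0 hr5]
        have h2 : min i (mr (s :: t)) = min r (mr t) := by
          simp only [mr, hrv]; omega
        rw [h2]
      · have hstep : stepB (some (i, nm i)) s = some (i, nm i) := by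
          simp [stepB, hg, hlt]
        rw [hstep, ih i h0 h5]
        have h2 : min i (mr (s :: t)) = min i (mr t) := by
          simp only [mr, hrv]; omega
        rw [h2]

lemma foldl_none (t : List String) :
    t.foldl stepB none = if mr t < 5 then some (mr t, nm (mr t)) else none := by
  induction t with
  | nil => simp [mr]
  | cons s t ih =>
    simp only [List.foldl_cons]
    rcases hg : PySem.Dict.get? qarank s with _ | r
    · have hrv : rv s = 5 := by simp [rv, hg]
      have hb := mr_bounds t
      have hm : mr (s :: t) = mr t := by simp only [mr, hrv]; omega
      rw [hm]
      simpa [stepB, hg] using ih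
    · obtain ⟨hr0, hr5, hnm, hrv⟩ := rank_char hg
      have hstep : stepB none s = some (r, nm r) := by simp [stepB, hg, hnm]
      rw [hstep, foldl_some t r hr0 hr5]
      have hm : mr (s :: t) = min r (mr t) := by simp only [mr, hrv]
      have hlt : min r (mr t) < 5 := lt_of_le_of_lt (min_le_left _ _) hr5
      rw [hm, if_pos hlt]

lemma B_char (states : List String) :
    select_qastate_alt states = if mr states < 5 then nm (mr states) else "" := by
  have h : select_qastate_alt states =
      match states.foldl stepB none with
      | none => ""
      | some p => p.2 := rfl
  rw [h, foldl_none]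
  split_ifs <;> simp

-- mr states ≤ j (j < 5) iff some state has rank ≤ j
lemma mr_le_iff (states : List String) (j : Int) (hj : j < 5) :
    mr states ≤ j ↔ ∃ s ∈ states, rv s ≤ j := by
  induction states with
  | nil => simp [mr]; omega
  | cons s t ih =>
    simp only [mr, min_le_iff, List.mem_cons]
    rw [ih]
    constructor
    · rintro (h | ⟨x, hx, hxr⟩)
      · exact ⟨s, Or.inl rfl, h⟩
      · exact ⟨x, Or.inr hx, hxr⟩
    · rintro ⟨x, (rfl | hx), hxr⟩
      · exact Or.inl hxr
      · exact Or.inr ⟨x, hx, hxr⟩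

lemma mem_iff_rv_le (states : List String) (j : Int) (h0 : 0 ≤ j) (h5 : j < 5) :
    (∃ s ∈ states, rv s ≤ j) ↔ ∃ k : Int, 0 ≤ k ∧ k ≤ j ∧ nm k ∈ states := by
  constructor
  · rintro ⟨s, hs, hr⟩
    have hc := rv_char s
    split_ifs at hc with h1 h2 h3 h4 hp5
    · exact ⟨0, le_rfl, by omega, by subst h1; simpa [nm] using hs⟩
    · exact ⟨1, by norm_num, by omega, by subst h2; simpa [nm] using hs⟩
    · exact ⟨2, by norm_num, by omega, by subst h3; simpa [nm] using hs⟩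
    · exact ⟨3, by norm_num, by omega, by subst h4; simpa [nm] using hs⟩
    · exact ⟨4, by norm_num, by omega, by subst hp5; simpa [nm] using hs⟩
    · omega
  · rintro ⟨k, hk0, hkj, hmem⟩
    refine ⟨nm k, hmem, ?_⟩
    have hk5 : k < 5 := by omega
    have : rv (nm k) = k := by
      interval_cases k <;> simp [nm, rv_char]
    omega

lemma A_char (states : List String) :
    select_qastate states =
      if "NONE" ∈ states then "NONE" else if "UNDEFINED" ∈ states then "UNDEFINED"
      else if "FAIL" ∈ states then "FAIL" else if "USABLE" ∈ states then "USABLE"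
      else if "PASS" ∈ states then "PASS" else "" := by
  simp [select_qastate, qastate_order, selLoopA]

-- ===== VERDICT (by name: the statement is the Claim_ definition above) =====
theorem select_qastate_spec : Claim_equal_select_qastate := by
  intro states _
  unfold Spec_select_qastate
  rw [A_char, B_char states]
  have hb := mr_bounds states
  have hiff : ∀ j : Int, 0 ≤ j → j < 5 →
      (mr states ≤ j ↔ ∃ k : Int, 0 ≤ k ∧ k ≤ j ∧ nm k ∈ states) := by
    intro j h0 h5
    rw [mr_le_iff states j h5, mem_iff_rv_le states j h0 h5]
  by_cases h0 : "NONE" ∈ states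
  · have : mr states ≤ 0 := (hiff 0 le_rfl (by norm_num)).2 ⟨0, le_rfl, le_rfl, h0⟩
    have hm : mr states = 0 := by omega
    simp [h0, hm, nm]
  · by_cases h1 : "UNDEFINED" ∈ states
    · have hle : mr states ≤ 1 := (hiff 1 (by norm_num) (by norm_num)).2 ⟨1, by norm_num, le_rfl, h1⟩
      have hne : ¬ mr states ≤ 0 := by
        intro hc
        obtain ⟨k, hk0, hkj, hmem⟩ := (hiff 0 le_rfl (by norm_num)).1 hc
        interval_cases k
        · exact h0 (by simpa [nm] using hmem)
      have hm : mr states = 1 := by omega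
      simp [h0, h1, hm, nm]
    · by_cases h2 : "FAIL" ∈ states
      · have hle : mr states ≤ 2 := (hiff 2 (by norm_num) (by norm_num)).2 ⟨2, by norm_num, le_rfl, h2⟩
        have hne : ¬ mr states ≤ 1 := by
          intro hc
          obtain ⟨k, hk0, hkj, hmem⟩ := (hiff 1 (by norm_num) (by norm_num)).1 hc
          interval_cases k
          · exact h0 (by simpa [nm] using hmem)
          · exact h1 (by simpa [nm] using hmem)
        have hm : mr states = 2 := by omega
        simp [h0, h1, h2, hm, nm]
      · by_cases h3 : "USABLE" ∈ states
        · have hle : mr states ≤ 3 := (hiff 3 (by norm_num) (by norm_num)).2 ⟨3, by norm_num, le_rfl, h3⟩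
          have hne : ¬ mr states ≤ 2 := by
            intro hc
            obtain ⟨k, hk0, hkj, hmem⟩ := (hiff 2 (by norm_num) (by norm_num)).1 hc
            interval_cases k
            · exact h0 (by simpa [nm] using hmem)
            · exact h1 (by simpa [nm] using hmem)
            · exact h2 (by simpa [nm] using hmem)
          have hm : mr states = 3 := by omega
          simp [h0, h1, h2, h3, hm, nm]
        · by_cases h4 : "PASS" ∈ states
          · have hle : mr states ≤ 4 := (hiff 4 (by norm_num) (by norm_num)).2 ⟨4, by norm_num, le_rfl, h4⟩
            have hne : ¬ mr states ≤ 3 := by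
              intro hc
              obtain ⟨k, hk0, hkj, hmem⟩ := (hiff 3 (by norm_num) (by norm_num)).1 hc
              interval_cases k
              · exact h0 (by simpa [nm] using hmem)
              · exact h1 (by simpa [nm] using hmem)
              · exact h2 (by simpa [nm] using hmem)
              · exact h3 (by simpa [nm] using hmem)
            have hm : mr states = 4 := by omega
            simp [h0, h1, h2, h3, h4, hm, nm]
          · have hne : ¬ mr states < 5 := by
              intro hc
              obtain ⟨k, hk0, hkj, hmem⟩ := (hiff 4 (by norm_num) (by norm_num)).1 (by omega)
              interval_cases k
              · exact h0 (by simpa [nm] using hmem)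
              · exact h1 (by simpa [nm] using hmem)
              · exact h2 (by simpa [nm] using hmem)
              · exact h3 (by simpa [nm] using hmem)
              · exact h4 (by simpa [nm] using hmem)
            simp [h0, h1, h2, h3, h4, hne]
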